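-- pv_equiv track=rewrite | github.com/nicolair/IPT2 | Cboustro_2.py | boustro2
-- ===== SOURCE A (Python) =====
-- def boustro2(n):
--     # initialisations
--     P = [0,0,1]
--     Valeur = {(0,0):1}
--     c = 1
--     def Vsuivant(P):
--         sens = P[2]
--         if P[0] - sens*P[1] == 0:
--             P[0] += sens
--             P[1] += 1
--             P[2] *= -1
--             return 0
--         a = P[0]
--         P[0] += 2*sens
--         return  Valeur[a,P[1]] + Valeur[a+sens,P[1]-1]
--     # boucle principale
--     while c < n:
--         v = Vsuivant(P)
--         Valeur[P[0],P[1]] = v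
--         c += 1
--     return  Valeur
-- ===== SOURCE B (Python) =====
-- def boustro2(n):
--     # Row-by-row boustrophedon transform: each new row (in traversal order) is
--     # the running-sum of 0 followed by the reversed previous row; no dict lookups.
--     result = {(0, 0): 1}
--     count = 1
--     row = [1]          # values of the previous row in traversal order
--     k = 0
--     while count < n:
--         k += 1
--         sens = (-1) ** k
--         x = -sens * k
--         acc = 0
--         new_row = []
--         for p in [0] + row[::-1]:
--             acc += p
--             result[(x, k)] = acc
--             new_row.append(acc)
--             count += 1
--             if count == n:
--                 break
--             x += 2 * sens
--         row = new_row
--     return result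
-- ===== Notes on version B (the rewrite author's own statement) =====
-- stated objective: alternative
-- what changed: B builds the triangle row by row as plain lists (each new row is a running sum over the reversed previous row), inserting keys as it goes, instead of A's per-entry walk that keeps a mutable position/direction state and reads two earlier values back out of the dictionary.
import Mathlib
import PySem

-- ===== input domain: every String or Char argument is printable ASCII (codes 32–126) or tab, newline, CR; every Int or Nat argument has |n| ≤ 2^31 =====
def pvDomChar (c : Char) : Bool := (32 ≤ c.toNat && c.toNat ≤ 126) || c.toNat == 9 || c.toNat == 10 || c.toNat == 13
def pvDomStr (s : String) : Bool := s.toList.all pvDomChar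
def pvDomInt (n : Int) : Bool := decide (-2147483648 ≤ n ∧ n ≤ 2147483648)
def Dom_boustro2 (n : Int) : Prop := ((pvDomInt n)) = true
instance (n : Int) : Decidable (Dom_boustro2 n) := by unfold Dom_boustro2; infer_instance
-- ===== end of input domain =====

-- B re-implements the boustrophedon-triangle dictionary row by row (each row is a
-- running sum over the reversed previous row, no dict lookups) instead of A's
-- per-entry walk with positional state and two dict lookups; objective: alternative.

-- ===== PORT A =====
-- Vsuivant: mutates P = (x, y, sens) and returns the next value (dict indexing
-- Valeur[…] is ported as getD 0; on every reachable state the key is present,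
-- which the equivalence proof establishes, so this is exact on reachable states).
def vsuivantA (P : Int × Int × Int) (V : PySem.Dict (Int × Int) Int) :
    (Int × Int × Int) × Int :=
  let sens := P.2.2
  if P.1 - sens * P.2.1 = 0 then
    ((P.1 + sens, P.2.1 + 1, P.2.2 * (-1)), 0)
  else
    ((P.1 + 2 * sens, P.2.1, P.2.2),
      V.getD (P.1, P.2.1) 0 + V.getD (P.1 + sens, P.2.1 - 1) 0)

-- while c < n: c increases by exactly 1 each pass, so the loop runs (n-1).toNat times
def loopA : Nat → (Int × Int × Int) → PySem.Dict (Int × Int) Int →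
    PySem.Dict (Int × Int) Int
  | 0, _, V => V
  | f + 1, P, V =>
    let r := vsuivantA P V
    loopA f r.1 (V.insert (r.1.1, r.1.2.1) r.2)

def boustro2 (n : Int) : List (Int × Int × Int) :=
  let V : PySem.Dict (Int × Int) Int := PySem.Dict.ofList [((0, 0), 1)]
  ((loopA (n - 1).toNat (0, 0, 1) V).items).map (fun p => (p.1.1, p.1.2, p.2))

-- ===== PORT B =====
-- inner 'for p in [0] + row[::-1]' loop; returns (result, new_row, count)
def rowLoopB (n : Int) : List Int → Int → Int → Int → Int → Int →
    PySem.Dict (Int × Int) Int → List Int →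
    PySem.Dict (Int × Int) Int × List Int × Int
  | [], _, _, _, _, count, result, newRow => (result, newRow, count)
  | p :: ps, x, sens, k, acc, count, result, newRow =>
    let acc := acc + p
    let result := result.insert (x, k) acc
    let newRow := newRow ++ [acc]
    let count := count + 1
    if count = n then (result, newRow, count)
    else rowLoopB n ps (x + 2 * sens) sens k acc count result newRow

-- outer 'while count < n' loop; count grows by ≥ 1 per pass, so fuel (n-1).toNat suffices
def outerB (n : Int) : Nat → Int → Int → List Int → PySem.Dict (Int × Int) Int →
    PySem.Dict (Int × Int) Int
  | 0, _, _, _, result => result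
  | f + 1, k, count, row, result =>
    if count < n then
      let k := k + 1
      let sens : Int := (-1) ^ k.toNat
      let x := -sens * k
      let r := rowLoopB n (0 :: row.reverse) x sens k 0 count result []
      outerB n f k r.2.2 r.2.1 r.1
    else result

def boustro2_alt (n : Int) : List (Int × Int × Int) :=
  let result : PySem.Dict (Int × Int) Int := PySem.Dict.ofList [((0, 0), 1)]
  ((outerB n (n - 1).toNat 0 1 [1] result).items).map (fun p => (p.1.1, p.1.2, p.2))

-- ===== PRECONDITION & SPEC =====
def Spec_boustro2 (n : Int) (out : List (Int × Int × Int)) : Prop := out = boustro2_alt n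
instance (n : Int) (out : List (Int × Int × Int)) : Decidable (Spec_boustro2 n out) := by unfold Spec_boustro2; infer_instance

-- ===== CLAIM (what is proved, stated in full; the proofs are below) =====
def Claim_equal_boustro2 : Prop := ∀ (n : Int), Dom_boustro2 n → Spec_boustro2 n (boustro2 n)

-- ===== LEMMAS AND PROOFS =====

-- canonical description of the triangle: values of row k in traversal order
def scan0 : Int → List Int → List Int
  | a, [] => [a]
  | a, h :: t => a :: scan0 (a + h) t

def rowVals : Nat → List Int
  | 0 => [1]
  | k + 1 => scan0 0 (rowVals k).reverse

def sgn (k : Nat) : Int := (-1) ^ k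
def xc (k i : Nat) : Int := -(sgn k) * k + 2 * (sgn k) * i

-- the dictionary entry for row k, traversal index j
def fent (k j : Nat) : (Int × Int) × Int := ((xc k j, (k : Int)), (rowVals k).getD j 0)

def rowsUpTo : Nat → List ((Int × Int) × Int)
  | 0 => []
  | K + 1 => rowsUpTo K ++ (List.range (K + 1)).map (fent K)

-- entries stored after finishing rows < k plus the first i entries of row k
def E' (k i : Nat) : List ((Int × Int) × Int) :=
  rowsUpTo k ++ (List.range i).map (fent k)

theorem scan0_length (l : List Int) (a : Int) : (scan0 a l).length = l.length + 1 := by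
  induction l generalizing a with
  | nil => rfl
  | cons h t ih => simp [scan0, ih]

theorem scan0_getD_zero (l : List Int) (a : Int) : (scan0 a l).getD 0 0 = a := by
  cases l <;> rfl

theorem scan0_getD_succ (l : List Int) (a : Int) (j : Nat) (hj : j < l.length) :
    (scan0 a l).getD (j + 1) 0 = (scan0 a l).getD j 0 + l.getD j 0 := by
  induction l generalizing a j with
  | nil => simp at hj
  | cons h t ih =>
    cases j with
    | zero =>
      have h0 := scan0_getD_zero t (a + h)
      simp only [scan0, List.getD_cons_succ, List.getD_cons_zero]
      simpa [List.getD] using h0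
    | succ j' =>
      simp only [scan0, List.getD_cons_succ]
      exact ih (a + h) j' (by simpa using hj)

theorem rowVals_length (k : Nat) : (rowVals k).length = k + 1 := by
  induction k with
  | zero => rfl
  | succ k ih => simp [rowVals, scan0_length, ih]

theorem sgn_cases (k : Nat) : sgn k = 1 ∨ sgn k = -1 := by
  rcases Nat.even_or_odd k with h | h
  · left; exact h.neg_one_pow
  · right; exact h.neg_one_pow

theorem sgn_succ (k : Nat) : sgn (k + 1) = -(sgn k) := by
  simp [sgn, pow_succ]

theorem xc_inj {k a b : Nat} (h : xc k a = xc k b) : a = b := by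
  rcases sgn_cases k with hs | hs <;> (rw [xc, xc, hs] at h; omega)

theorem xc_zero (k : Nat) : xc k 0 = -(sgn k) * k := by simp [xc]

-- value recurrence: each value adds the previous row read in reverse
theorem rowVals_succ_getD (M i : Nat) (hi : i < M + 1) :
    (rowVals (M + 1)).getD (i + 1) 0
      = (rowVals (M + 1)).getD i 0 + (rowVals M).getD (M - i) 0 := by
  have hlen : (rowVals M).reverse.length = M + 1 := by simp [rowVals_length]
  have h := scan0_getD_succ (rowVals M).reverse 0 i (by omega)
  rw [show rowVals (M + 1) = scan0 0 (rowVals M).reverse from rfl, h]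
  congr 1
  have hi' : i < (rowVals M).reverse.length := by omega
  have hi'' : M - i < (rowVals M).length := by rw [rowVals_length]; omega
  rw [List.getD_eq_getElem _ _ hi', List.getD_eq_getElem _ _ hi'',
    List.getElem_reverse]
  congr 1
  simp only [rowVals_length]
  omega

theorem snd_mem_rowsUpTo {M : Nat} {p : (Int × Int) × Int} (h : p ∈ rowsUpTo M) :
    0 ≤ p.1.2 ∧ p.1.2 < (M : Int) := by
  induction M with
  | zero => simp [rowsUpTo] at h
  | succ K ih =>
    simp only [rowsUpTo, List.mem_append, List.mem_map] at h
    rcases h with h | ⟨j, _, rfl⟩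
    · obtain ⟨h0, h1⟩ := ih h
      refine ⟨h0, ?_⟩
      push_cast
      omega
    · simp only [fent]
      push_cast
      omega

theorem nodup_keys_rowsUpTo (M : Nat) : ((rowsUpTo M).map Prod.fst).Nodup := by
  induction M with
  | zero => simp [rowsUpTo]
  | succ K ih =>
    rw [rowsUpTo, List.map_append, List.nodup_append]
    refine ⟨ih, ?_, ?_⟩
    · rw [List.map_map]
      refine List.Nodup.map_on ?_ (List.nodup_range)
      intro a _ b _ hab
      simp only [Function.comp, fent] at hab
      exact xc_inj (by injection hab)
    · intro a ha b hb
      obtain ⟨p, hp, rfl⟩ := List.mem_map.mp ha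
      rw [List.map_map] at hb
      obtain ⟨j, hj, hjb⟩ := List.mem_map.mp hb
      intro hab
      have hbnd := snd_mem_rowsUpTo hp
      have hK : b.2 = (K : Int) := by rw [← hjb]; rfl
      rw [hab] at hbnd
      omega

theorem E'_length (k i : Nat) : (E' k i).length = (rowsUpTo k).length + i := by
  simp [E']

theorem E'_succ (k i : Nat) : E' k (i + 1) = E' k i ++ [fent k i] := by
  simp [E', List.range_succ]

theorem E'_full (k : Nat) : E' k (k + 1) = rowsUpTo (k + 1) := rfl

theorem E'_sublist (k i : Nat) (hi : i ≤ k + 1) :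
    List.Sublist (E' k i) (rowsUpTo (k + 1)) := by
  rw [rowsUpTo]
  exact (List.append_sublist_append_left _).mpr
    (((List.range_sublist).mpr hi).map _)

theorem nodup_keys_E' (k i : Nat) (hi : i ≤ k + 1) : ((E' k i).map Prod.fst).Nodup := by
  exact (nodup_keys_rowsUpTo (k + 1)).sublist ((E'_sublist k i hi).map _)

theorem fent_mem_rowsUpTo {K k' j : Nat} (h : k' < K) (hj : j ≤ k') :
    fent k' j ∈ rowsUpTo K := by
  induction K with
  | zero => omega
  | succ K ih =>
    rw [rowsUpTo]
    rcases Nat.lt_or_ge k' K with h2 | h2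
    · exact List.mem_append_left _ (ih h2)
    · have hKk : k' = K := by omega
      subst hKk
      exact List.mem_append_right _ (List.mem_map_of_mem (List.mem_range.mpr (by omega)))

theorem mem_E'_of_lt {k i k' j : Nat} (hk : k' < k ∨ (k' = k ∧ j < i)) (hj : j ≤ k') :
    fent k' j ∈ E' k i := by
  rcases hk with hk | ⟨rfl, hj2⟩
  · exact List.mem_append_left _ (fent_mem_rowsUpTo hk hj)
  · exact List.mem_append_right _ (List.mem_map_of_mem (List.mem_range.mpr hj2))

-- a key of row k with index ≥ i is fresh in E' k i
theorem fresh_key_E' (k i j : Nat) (hij : i ≤ j) :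
    (xc k j, (k : Int)) ∉ (E' k i).map Prod.fst := by
  intro hmem
  simp only [E', List.map_append, List.mem_append] at hmem
  rcases hmem with hmem | hmem
  · obtain ⟨p, hp, hpk⟩ := List.mem_map.mp hmem
    have := snd_mem_rowsUpTo hp
    rw [hpk] at this
    simp at this
  · rw [List.map_map] at hmem
    obtain ⟨j', hj', hja⟩ := List.mem_map.mp hmem
    have hx : xc k j' = xc k j := by
      have : (fent k j').1 = (xc k j, (k : Int)) := hja
      exact congrArg Prod.fst this
    have := xc_inj hx
    simp at hj'
    omega

-- lookup in a dict whose items are E' k i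
theorem lookup_E' (V : PySem.Dict (Int × Int) Int) (k i k' j : Nat)
    (hV : V.items = E' k i) (hik : i ≤ k + 1)
    (hj : j ≤ k') (hk : k' < k ∨ (k' = k ∧ j < i)) :
    V.getD (xc k' j, (k' : Int)) 0 = (rowVals k').getD j 0 := by
  have hmem : ((xc k' j, (k' : Int)), (rowVals k').getD j 0) ∈ V.items := by
    rw [hV]; exact mem_E'_of_lt hk hj
  have hkeys : V.keys = V.items.map Prod.fst := rfl
  have hnd : V.keys.Nodup := by
    rw [hkeys, hV]; exact nodup_keys_E' k i hik
  exact PySem.Dict.getD_of_mem_items V hmem hnd 0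

theorem E'_zero (k : Nat) : E' k 0 = rowsUpTo k := by simp [E']

theorem insert_E' (V : PySem.Dict (Int × Int) Int) (k i : Nat)
    (hV : V.items = E' k i) :
    (V.insert (xc k i, (k : Int)) ((rowVals k).getD i 0)).items = E' k (i + 1) := by
  have hfresh : V.contains (xc k i, (k : Int)) = false := by
    rw [← Bool.not_eq_true, PySem.Dict.contains_iff_mem_keys]
    show ¬ _ ∈ V.items.map _
    rw [hV]
    exact fresh_key_E' k i i le_rfl
  rw [PySem.Dict.items_insert_of_not_contains V _ hfresh, hV, E'_succ]
  rfl

-- ===== A-side loop invariant =====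
theorem xc_cond_eq (K : Nat) : xc K K - sgn K * K = 0 := by
  rcases sgn_cases K with hs | hs <;> (rw [xc, hs]; ring)

theorem xc_cond_ne (K i : Nat) (h : i < K) : xc K i - sgn K * K ≠ 0 := by
  rcases sgn_cases K with hs | hs <;> (rw [xc, hs]; omega)

theorem xc_step (k i : Nat) : xc k i + 2 * sgn k = xc k (i + 1) := by
  rw [xc, xc]; push_cast; ring

theorem xc_step_down (M i : Nat) (hi : i ≤ M) :
    xc (M + 1) i + sgn (M + 1) = xc M (M - i) := by
  rcases sgn_cases M with hs | hs <;>
    (simp only [xc, sgn_succ, hs]; push_cast [Nat.cast_sub hi]; ring)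

theorem rowVals_getD_zero (K : Nat) : (rowVals (K + 1)).getD 0 0 = 0 :=
  scan0_getD_zero _ 0

theorem rowsUpTo_length_succ (K : Nat) :
    (rowsUpTo (K + 1)).length = (rowsUpTo K).length + (K + 1) := by
  simp [rowsUpTo]

theorem loopA_inv (f : Nat) : ∀ (K i : Nat) (V : PySem.Dict (Int × Int) Int),
    i ≤ K → V.items = E' K (i + 1) →
    ∃ K' I', I' ≤ K' ∧
      (loopA f (xc K i, (K : Int), sgn K) V).items = E' K' (I' + 1) ∧
      (rowsUpTo K').length + I' = (rowsUpTo K).length + i + f := by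
  induction f with
  | zero =>
    intro K i V hiK hV
    exact ⟨K, i, hiK, hV, by omega⟩
  | succ f ih =>
    intro K i V hiK hV
    rcases Nat.lt_or_ge i K with hlt | hge
    · -- mid-row step: store entry (K, i+1)
      obtain ⟨M, rfl⟩ : ∃ M, K = M + 1 := ⟨K - 1, by omega⟩
      have hcond := xc_cond_ne (M + 1) i hlt
      have hl1 : V.getD (xc (M + 1) i, ((M + 1 : Nat) : Int)) 0
          = (rowVals (M + 1)).getD i 0 :=
        lookup_E' V (M + 1) (i + 1) (M + 1) i hV (by omega) (by omega)
          (Or.inr ⟨rfl, by omega⟩)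
      have hl2 : V.getD (xc (M + 1) i + sgn (M + 1), ((M + 1 : Nat) : Int) - 1) 0
          = (rowVals M).getD (M - i) 0 := by
        have hc : ((M + 1 : Nat) : Int) - 1 = (M : Int) := by push_cast; ring
        rw [xc_step_down M i (by omega), hc]
        exact lookup_E' V (M + 1) (i + 1) M (M - i) hV (by omega) (by omega)
          (Or.inl (by omega))
      have hval : (rowVals (M + 1)).getD i 0 + (rowVals M).getD (M - i) 0
          = (rowVals (M + 1)).getD (i + 1) 0 := (rowVals_succ_getD M i (by omega)).symm
      have hins : (V.insert (xc (M + 1) (i + 1), ((M + 1 : Nat) : Int))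
            ((rowVals (M + 1)).getD (i + 1) 0)).items = E' (M + 1) (i + 1 + 1) :=
        insert_E' V (M + 1) (i + 1) hV
      simp only [loopA, vsuivantA, if_neg hcond]
      rw [hl1, hl2, hval, xc_step]
      obtain ⟨K', I', h1, h2, h3⟩ := ih (M + 1) (i + 1)
        (V.insert (xc (M + 1) (i + 1), ((M + 1 : Nat) : Int))
          ((rowVals (M + 1)).getD (i + 1) 0)) (by omega) hins
      exact ⟨K', I', h1, h2, by omega⟩
    · -- row switch: start row K+1
      have hiK' : i = K := by omega
      subst hiK'
      have hcond := xc_cond_eq i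
      have hP1 : xc i i + sgn i = xc (i + 1) 0 := by
        rw [xc_zero, sgn_succ]; rw [xc]; push_cast; ring
      have hP2 : (i : Int) + 1 = ((i + 1 : Nat) : Int) := by push_cast; ring
      have hP3 : sgn i * (-1) = sgn (i + 1) := by rw [sgn_succ]; ring
      have hV' : V.items = E' (i + 1) 0 := by rw [E'_zero]; exact hV
      have hins : (V.insert (xc (i + 1) 0, ((i + 1 : Nat) : Int)) (0 : Int)).items
          = E' (i + 1) (0 + 1) := by
        rw [show (0 : Int) = (rowVals (i + 1)).getD 0 0 from (rowVals_getD_zero i).symm]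
        exact insert_E' V (i + 1) 0 hV'
      simp only [loopA, vsuivantA, hcond, if_pos]
      rw [hP1, hP2, hP3]
      obtain ⟨K', I', h1, h2, h3⟩ := ih (i + 1) 0
        (V.insert (xc (i + 1) 0, ((i + 1 : Nat) : Int)) 0) (by omega) hins
      refine ⟨K', I', h1, h2, ?_⟩
      rw [rowsUpTo_length_succ] at h3
      omega

-- ===== B-side loop invariants =====
theorem scan0_head? (a : Int) (l : List Int) : (scan0 a l).head? = some a := by
  cases l <;> rfl

theorem rowLoopB_nil (n x sens k acc count : Int)
    (result : PySem.Dict (Int × Int) Int) (newRow : List Int) :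
    rowLoopB n [] x sens k acc count result newRow = (result, newRow, count) := rfl

theorem rowLoopB_cons (n : Int) (p : Int) (ps : List Int) (x sens k acc count : Int)
    (result : PySem.Dict (Int × Int) Int) (newRow : List Int) :
    rowLoopB n (p :: ps) x sens k acc count result newRow =
      if count + 1 = n then
        (result.insert (x, k) (acc + p), newRow ++ [acc + p], count + 1)
      else
        rowLoopB n ps (x + 2 * sens) sens k (acc + p) (count + 1)
          (result.insert (x, k) (acc + p)) (newRow ++ [acc + p]) := rfl

theorem rowLoopB_inv (n : Int) (l : List Int) : ∀ (K i : Nat) (acc : Int)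
    (V : PySem.Dict (Int × Int) Int) (nr : List Int),
    i ≤ K →
    scan0 acc l = acc :: (rowVals K).drop i →
    V.items = E' K i →
    ((E' K i).length : Int) < n →
    ∃ j V', i ≤ j ∧ j ≤ K ∧
      rowLoopB n l (xc K i) (sgn K) (K : Int) acc ((E' K i).length : Int) V nr
        = (V', nr ++ ((rowVals K).drop i).take (j + 1 - i), ((E' K (j + 1)).length : Int)) ∧
      V'.items = E' K (j + 1) ∧
      ((E' K (j + 1)).length : Int) ≤ n ∧
      (((E' K (j + 1)).length : Int) = n ∨ j = K) := by
  induction l with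
  | nil =>
    intro K i acc V nr hiK hscan hV hlt
    exfalso
    have := congrArg List.length hscan
    simp [scan0, rowVals_length] at this
    omega
  | cons p t ih =>
    intro K i acc V nr hiK hscan hV hlt
    have hidx : i < (rowVals K).length := by rw [rowVals_length]; omega
    have hdrop : (rowVals K).drop i = (rowVals K)[i] :: (rowVals K).drop (i + 1) :=
      List.drop_eq_getElem_cons hidx
    have htail : scan0 (acc + p) t = (rowVals K).drop i := by
      have : scan0 acc (p :: t) = acc :: scan0 (acc + p) t := rfl
      rw [this] at hscan
      exact (List.cons.injEq _ _ _ _ ▸ hscan).2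
    have hval : acc + p = (rowVals K).getD i 0 := by
      have h1 := scan0_head? (acc + p) t
      rw [htail, hdrop] at h1
      simp only [List.head?_cons, Option.some.injEq] at h1
      rw [List.getD_eq_getElem _ _ hidx]
      exact h1.symm
    have hins : (V.insert (xc K i, (K : Int)) (acc + p)).items = E' K (i + 1) := by
      rw [hval]
      exact insert_E' V K i hV
    have hcnt : ((E' K i).length : Int) + 1 = ((E' K (i + 1)).length : Int) := by
      simp only [E'_length]
      push_cast
      ring
    have htake1 : ((rowVals K).drop i).take 1 = [acc + p] := by
      rw [hdrop, hval, List.getD_eq_getElem _ _ hidx]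
      rfl
    by_cases hstop : ((E' K i).length : Int) + 1 = n
    · refine ⟨i, V.insert (xc K i, (K : Int)) (acc + p), le_rfl, hiK, ?_, hins, ?_, ?_⟩
      · rw [rowLoopB_cons, if_pos hstop]
        rw [show i + 1 - i = 1 from by omega, htake1, ← hcnt]
      · rw [← hcnt]; omega
      · left; rw [← hcnt]; exact hstop
    · cases t with
      | nil =>
        have hiK' : i = K := by
          have hlen := congrArg List.length htail
          rw [scan0_length, List.length_drop, rowVals_length] at hlen
          simp at hlen
          omega
        subst hiK'
        refine ⟨i, V.insert (xc i i, (i : Int)) (acc + p), le_rfl, le_rfl, ?_, hins, ?_, Or.inr rfl⟩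
        · rw [rowLoopB_cons, if_neg hstop, rowLoopB_nil]
          rw [show i + 1 - i = 1 from by omega, htake1, hcnt]
        · rw [← hcnt]; omega
      | cons q t' =>
        have hiltK : i < K := by
          have hlen := congrArg List.length htail
          rw [scan0_length, List.length_drop, rowVals_length] at hlen
          simp only [List.length_cons] at hlen
          omega
        have htail' : scan0 (acc + p) (q :: t') = (acc + p) :: (rowVals K).drop (i + 1) := by
          rw [htail, hdrop, hval, List.getD_eq_getElem _ _ hidx]
        obtain ⟨j, V', hij, hjK, heq, hV', hle, hor⟩ :=
          ih K (i + 1) (acc + p) (V.insert (xc K i, (K : Int)) (acc + p)) (nr ++ [acc + p])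
            (by omega) htail' hins (by omega)
        refine ⟨j, V', by omega, hjK, ?_, hV', hle, hor⟩
        rw [rowLoopB_cons, if_neg hstop]
        rw [hcnt, xc_step, heq, List.append_assoc]
        congr 2
        rw [hdrop, show j + 1 - i = (j - i) + 1 from by omega, List.take_succ_cons,
          show j + 1 - (i + 1) = j - i from by omega]
        simp [hval, List.getD, List.getElem?_eq_getElem hidx]

theorem outerB_stop (n : Int) (f : Nat) (k c : Int) (row : List Int)
    (V : PySem.Dict (Int × Int) Int) (h : ¬ c < n) :
    outerB n f k c row V = V := by
  cases f <;> simp [outerB, h]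

theorem outerB_succ (n : Int) (f : Nat) (k c : Int) (row : List Int)
    (V : PySem.Dict (Int × Int) Int) :
    outerB n (f + 1) k c row V =
      if c < n then
        outerB n f (k + 1)
          (rowLoopB n (0 :: row.reverse) (-((-1 : Int) ^ (k + 1).toNat) * (k + 1))
            ((-1 : Int) ^ (k + 1).toNat) (k + 1) 0 c V []).2.2
          (rowLoopB n (0 :: row.reverse) (-((-1 : Int) ^ (k + 1).toNat) * (k + 1))
            ((-1 : Int) ^ (k + 1).toNat) (k + 1) 0 c V []).2.1
          (rowLoopB n (0 :: row.reverse) (-((-1 : Int) ^ (k + 1).toNat) * (k + 1))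
            ((-1 : Int) ^ (k + 1).toNat) (k + 1) 0 c V []).1
      else V := rfl

theorem outerB_inv (n : Int) (f : Nat) : ∀ (K : Nat) (V : PySem.Dict (Int × Int) Int),
    V.items = rowsUpTo (K + 1) →
    ((rowsUpTo (K + 1)).length : Int) ≤ n →
    (n : Int) ≤ ((rowsUpTo (K + 1)).length : Int) + f →
    ∃ K' J, J ≤ K' + 1 ∧
      (outerB n f (K : Int) ((rowsUpTo (K + 1)).length : Int) (rowVals K) V).items
        = E' K' J ∧
      ((E' K' J).length : Int) = n := by
  induction f with
  | zero =>
    intro K V hV hle hge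
    refine ⟨K, K + 1, le_rfl, ?_, ?_⟩
    · simpa [outerB] using hV
    · rw [E'_full]
      omega
  | succ f ih =>
    intro K V hV hle hge
    by_cases hlt : ((rowsUpTo (K + 1)).length : Int) < n
    · rw [outerB_succ, if_pos hlt]
      -- identify the port's row-k+1 arguments
      have hsens : ((-1 : Int) ^ (((K : Int)) + 1).toNat) = sgn (K + 1) := by
        rw [show ((K : Int) + 1) = ((K + 1 : Nat) : Int) from by push_cast; ring,
          Int.toNat_natCast]
        rfl
      have hx : -((-1 : Int) ^ (((K : Int)) + 1).toNat) * (((K : Int)) + 1) = xc (K + 1) 0 := by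
        rw [hsens, xc_zero]
        push_cast
        ring
      have hk1 : ((K : Int)) + 1 = ((K + 1 : Nat) : Int) := by push_cast; ring
      have hscan : scan0 0 (0 :: (rowVals K).reverse) = 0 :: (rowVals (K + 1)).drop 0 := by
        rw [List.drop_zero]
        show (0 : Int) :: scan0 (0 + 0) (rowVals K).reverse = _
        norm_num
        rfl
      have hV0 : V.items = E' (K + 1) 0 := by rw [E'_zero]; exact hV
      have hc : ((rowsUpTo (K + 1)).length : Int) = ((E' (K + 1) 0).length : Int) := by
        rw [E'_length]; push_cast; ring
      obtain ⟨j, V', _, hjK, heq, hV', hle', hor⟩ :=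
        rowLoopB_inv n (0 :: (rowVals K).reverse) (K + 1) 0 0 V []
          (Nat.zero_le _) hscan hV0 (by rw [← hc]; exact hlt)
      rw [hx, hsens, hk1, hc, heq]
      simp only [List.nil_append, List.drop_zero, Nat.sub_zero]
      rcases hor with hstop | hfull
      · rw [outerB_stop n f _ _ _ _ (by omega)]
        exact ⟨K + 1, j + 1, by omega, hV', hstop⟩
      · subst hfull
        have hrow : (rowVals (K + 1)).take (K + 1 + 1) = rowVals (K + 1) :=
          List.take_of_length_le (by rw [rowVals_length])
        have hitems : V'.items = rowsUpTo (K + 1 + 1) := by rw [hV']; rfl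
        have hlen2 : ((E' (K + 1) (K + 1 + 1)).length : Int)
            = ((rowsUpTo (K + 1 + 1)).length : Int) := by rw [E'_full]
        rw [hrow, hlen2]
        have hge2 : (n : Int) ≤ ((rowsUpTo (K + 1 + 1)).length : Int) + f := by
          rw [rowsUpTo_length_succ (K + 1)]
          push_cast
          push_cast at hge
          omega
        exact ih (K + 1) V' hitems (by rw [← hlen2]; exact hle') hge2
    · rw [outerB_succ, if_neg hlt]
      refine ⟨K, K + 1, le_rfl, hV, ?_⟩
      rw [E'_full]
      omega

theorem E'_eq_take (k i : Nat) (hi : i ≤ k + 1) :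
    E' k i = (rowsUpTo (k + 1)).take ((rowsUpTo k).length + i) := by
  rw [show rowsUpTo (k + 1) = rowsUpTo k ++ (List.range (k + 1)).map (fent k) from rfl,
    List.take_append, List.take_of_length_le (by omega),
    Nat.add_sub_cancel_left, ← List.map_take, List.take_range]
  rw [E']
  congr 2
  rw [Nat.min_eq_left hi]

theorem rowsUpTo_le_append {M M' : Nat} (h : M ≤ M') :
    ∃ r, rowsUpTo M' = rowsUpTo M ++ r := by
  induction M' with
  | zero => exact ⟨[], by simp [show M = 0 from by omega, rowsUpTo]⟩
  | succ M'' ih =>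
    rcases Nat.lt_or_ge M (M'' + 1) with h2 | h2
    · obtain ⟨r, hr⟩ := ih (by omega)
      exact ⟨r ++ (List.range (M'' + 1)).map (fent M''), by rw [rowsUpTo, hr, List.append_assoc]⟩
    · exact ⟨[], by rw [show M = M'' + 1 from by omega]; simp⟩

theorem take_rowsUpTo_congr {M M' t : Nat} (h1 : t ≤ (rowsUpTo M).length)
    (h2 : t ≤ (rowsUpTo M').length) :
    (rowsUpTo M).take t = (rowsUpTo M').take t := by
  rcases le_total M M' with h | h
  · obtain ⟨r, hr⟩ := rowsUpTo_le_append h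
    rw [hr, List.take_append_of_le_length h1]
  · obtain ⟨r, hr⟩ := rowsUpTo_le_append h
    rw [hr, List.take_append_of_le_length h2]

theorem E'_congr_of_length {k i k' i' : Nat} (hi : i ≤ k + 1) (hi' : i' ≤ k' + 1)
    (hlen : (E' k i).length = (E' k' i').length) : E' k i = E' k' i' := by
  have e1 := E'_eq_take k i hi
  have e2 := E'_eq_take k' i' hi'
  have l1 : (E' k i).length = (rowsUpTo k).length + i := E'_length k i
  have l2 : (E' k' i').length = (rowsUpTo k').length + i' := E'_length k' i'
  have hb1 : (rowsUpTo k).length + i ≤ (rowsUpTo (k + 1)).length := by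
    rw [rowsUpTo_length_succ]; omega
  have hb2 : (rowsUpTo k').length + i' ≤ (rowsUpTo (k' + 1)).length := by
    rw [rowsUpTo_length_succ]; omega
  rw [e1, e2, ← l1, ← l2, hlen]
  exact take_rowsUpTo_congr (by omega) (by omega)

theorem boustro2_spec' (n : Int) : boustro2 n = boustro2_alt n := by
  by_cases hn : n ≤ 1
  · have hm : (n - 1).toNat = 0 := by omega
    simp [boustro2, boustro2_alt, hm, loopA, outerB]
  · rw [not_le] at hn
    have hm : ((n - 1).toNat : Int) = n - 1 := Int.toNat_of_nonneg (by omega)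
    have hV0 : (PySem.Dict.ofList [(((0 : Int), (0 : Int)), (1 : Int))]).items = E' 0 1 := by
      decide
    obtain ⟨K1, I1, hI1, hA, hlenA⟩ :=
      loopA_inv (n - 1).toNat 0 0 (PySem.Dict.ofList [(((0 : Int), (0 : Int)), (1 : Int))])
        le_rfl hV0
    have hst : (xc 0 0, ((0 : Nat) : Int), sgn 0) = ((0 : Int), (0 : Int), (1 : Int)) := by
      norm_num [xc, sgn]
    rw [hst] at hA
    have hV1 : (PySem.Dict.ofList [(((0 : Int), (0 : Int)), (1 : Int))]).items = rowsUpTo 1 := by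
      decide
    obtain ⟨K2, J2, hJ2, hB, hlenB⟩ :=
      outerB_inv n (n - 1).toNat 0 (PySem.Dict.ofList [(((0 : Int), (0 : Int)), (1 : Int))])
        hV1 (by norm_num [rowsUpTo]; omega) (by norm_num [rowsUpTo]; omega)
    simp only [Nat.cast_zero, show ((rowsUpTo 1).length : Int) = 1 from by norm_num [rowsUpTo],
      show rowVals 0 = [1] from rfl] at hB
    have hlen : (E' K1 (I1 + 1)).length = (E' K2 J2).length := by
      rw [E'_length, E'_length]
      have h0 : (rowsUpTo 0).length = 0 := rfl
      have hBlen := hlenB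
      rw [E'_length] at hBlen
      push_cast at hBlen
      omega
    have hEq : E' K1 (I1 + 1) = E' K2 J2 := E'_congr_of_length (by omega) hJ2 hlen
    show ((loopA (n - 1).toNat (0, 0, 1) _).items).map _ = ((outerB n (n - 1).toNat 0 1 [1] _).items).map _
    rw [hA, hB, hEq]

-- ===== VERDICT (by name: the statement is the Claim_ definition above) =====
theorem boustro2_spec : Claim_equal_boustro2 := by
  intro n _
  exact boustro2_spec' n
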